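-- pv_equiv track=rewrite | github.com/shinwanwan/QReative | QR_frame.py | frame_control
-- ===== SOURCE A (Python) =====
-- def frame_control(commands):
--     init_control = {
--         'position_pattern': True,
--         'alignment_pattern': True,
--         'timing_pattern': True,
--         'version_inform': True,
--         'format_inform': True,
--         'quiet_zone': True
--         }
--
--     for com, tf in commands.items():
--         # 在 Python 3 中 dict.has_key(key) 被 dict.__contain__(key) 取代
--         # 或也可改用以下方式
--         if com in init_control:
--             init_control[com] = tf
--
--     return init_control
-- ===== SOURCE B (Python) =====
-- def frame_control(commands):
--     g = commands.get
--     return {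
--         'position_pattern': g('position_pattern', True),
--         'alignment_pattern': g('alignment_pattern', True),
--         'timing_pattern': g('timing_pattern', True),
--         'version_inform': g('version_inform', True),
--         'format_inform': g('format_inform', True),
--         'quiet_zone': g('quiet_zone', True),
--     }
-- ===== Notes on version B (the rewrite author's own statement) =====
-- stated objective: idiomatic
-- what changed: B has no loop at all: it returns a straight-line dict literal whose six values are individual commands.get(key, True) lookups, instead of A's mutate-in-place loop over commands with membership tests.
import Mathlib
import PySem

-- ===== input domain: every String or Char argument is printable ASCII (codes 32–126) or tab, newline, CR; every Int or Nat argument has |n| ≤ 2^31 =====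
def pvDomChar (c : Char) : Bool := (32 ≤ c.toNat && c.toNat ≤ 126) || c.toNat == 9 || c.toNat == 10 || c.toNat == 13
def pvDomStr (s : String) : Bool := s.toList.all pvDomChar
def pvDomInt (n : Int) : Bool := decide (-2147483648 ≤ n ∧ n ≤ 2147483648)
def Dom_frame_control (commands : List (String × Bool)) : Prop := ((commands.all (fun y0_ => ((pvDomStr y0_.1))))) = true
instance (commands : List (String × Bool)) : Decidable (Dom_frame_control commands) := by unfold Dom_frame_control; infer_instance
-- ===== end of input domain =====

-- ===== PORT A =====
-- B replaces A's mutate-in-place loop with a loop-free dict literal of six commands.get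
-- lookups (idiomatic; return value only).
-- Port of A: build the default dict, then loop over commands.items(), overwriting known keys.
def fcInit : PySem.Dict String Bool :=
  PySem.Dict.ofList
    [("position_pattern", true), ("alignment_pattern", true), ("timing_pattern", true),
     ("version_inform", true), ("format_inform", true), ("quiet_zone", true)]

def frame_control (commands : List (String × Bool)) : List (String × Bool) :=
  (commands.foldl
      (fun d p => if d.contains p.1 then d.insert p.1 p.2 else d)
      fcInit).items

-- ===== PORT B =====
-- Port of B: commands.get(k, dflt) = first match in the association list, else dflt.
def fcGet (commands : List (String × Bool)) (k : String) (dflt : Bool) : Bool :=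
  match commands.find? (fun r => r.1 == k) with
  | some r => r.2
  | none => dflt

def frame_control_alt (commands : List (String × Bool)) : List (String × Bool) :=
  [("position_pattern", fcGet commands "position_pattern" true),
   ("alignment_pattern", fcGet commands "alignment_pattern" true),
   ("timing_pattern", fcGet commands "timing_pattern" true),
   ("version_inform", fcGet commands "version_inform" true),
   ("format_inform", fcGet commands "format_inform" true),
   ("quiet_zone", fcGet commands "quiet_zone" true)]

-- ===== PRECONDITION & SPEC =====
-- Pre_ only demands that the association list really represents a Python dict (unique keys):
-- every actual Python input satisfies it, since `commands` is a dict and dict keys are unique.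
def Pre_frame_control (commands : List (String × Bool)) : Prop :=
  (commands.map Prod.fst).Nodup
instance (commands : List (String × Bool)) : Decidable (Pre_frame_control commands) := by
  unfold Pre_frame_control; infer_instance

def pvWitness_frame_control : (List (String × Bool)) :=
  [("quiet_zone", false), ("foo", true)]

def Spec_frame_control (commands : List (String × Bool)) (out : List (String × Bool)) : Prop := out = frame_control_alt commands
instance (commands : List (String × Bool)) (out : List (String × Bool)) : Decidable (Spec_frame_control commands out) := by unfold Spec_frame_control; infer_instance

-- ===== CLAIM (what is proved, stated in full; the proofs are below) =====
def Claim_equal_frame_control : Prop := ∀ (commands : List (String × Bool)), Dom_frame_control commands → Pre_frame_control commands → Spec_frame_control commands (frame_control commands)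

-- ===== LEMMAS AND PROOFS =====

-- one step of A's loop rewrites every item whose key equals the command's key
lemma step_items (d : PySem.Dict String Bool) (p : String × Bool) :
    (if d.contains p.1 then d.insert p.1 p.2 else d).items
      = d.items.map (fun q => if q.1 == p.1 then (p.1, p.2) else q) := by
  by_cases h : d.contains p.1 = true
  · simp only [h, if_true]
    exact PySem.Dict.items_insert_of_contains d p.2 h
  · simp only [h, if_false, Bool.false_eq_true]
    symm
    rw [List.map_congr_left (g := id), List.map_id]
    intro q hq
    have : (q.1 == p.1) = false := by
      by_contra hc
      have : q.1 == p.1 := by revert hc; cases q.1 == p.1 <;> simp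
      exact h (List.any_eq_true.mpr ⟨q, hq, this⟩)
    simp [this]

-- A's whole loop, characterised by first-match lookup (keys of commands are unique)
lemma fold_items (l : List (String × Bool)) :
    ∀ (d : PySem.Dict String Bool), (l.map Prod.fst).Nodup →
    (l.foldl (fun d p => if d.contains p.1 then d.insert p.1 p.2 else d) d).items
      = d.items.map (fun q => (q.1, fcGet l q.1 q.2)) := by
  induction l with
  | nil => intro d _; simp [fcGet]
  | cons p l ih =>
    intro d hnd
    simp only [List.map_cons, List.nodup_cons] at hnd
    rw [List.foldl_cons, ih _ hnd.2, step_items, List.map_map]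
    apply List.map_congr_left
    intro q _
    simp only [Function.comp_apply]
    by_cases hk : q.1 = p.1
    · have hfind : l.find? (fun r => r.1 == p.1) = none := by
        rw [List.find?_eq_none]
        intro r hr
        simp only [beq_iff_eq]
        intro he
        exact hnd.1 (he ▸ List.mem_map_of_mem hr)
      simp [fcGet, hk, hfind]
    · have h1 : (q.1 == p.1) = false := by simp [hk]
      have h2 : (p.1 == q.1) = false := by rw [beq_eq_false_iff_ne]; exact fun h => hk h.symm
      simp [fcGet, h1, h2]

-- ===== VERDICT (by name: the statement is the Claim_ definition above) =====
theorem frame_control_spec : Claim_equal_frame_control := by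
  intro commands _ hpre
  unfold Spec_frame_control frame_control
  rw [fold_items commands fcInit hpre]
  rfl
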